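-- pv_equiv track=rewrite | github.com/cove/imago | photoalbums/lib/ai_verify_crops.py | _normalize_routing
-- ===== SOURCE A (Python) =====
-- ROUTABLE_CONCERNS = ("caption", "gps", "shown_location", "date")
--
-- def _clean_text(value: object) -> str:
--     return str(value or "").strip()
--
-- def _normalize_routing(values: object) -> list[str]:
--     if not isinstance(values, list):
--         return []
--     seen: set[str] = set()
--     result: list[str] = []
--     for value in values:
--         text = _clean_text(value)
--         if text not in ROUTABLE_CONCERNS or text in seen:
--             continue
--         seen.add(text)
--         result.append(text)
--     return result
-- ===== SOURCE B (Python) =====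
-- ROUTABLE_CONCERNS = ("caption", "gps", "shown_location", "date")
--
-- def _clean_text(value: object) -> str:
--     return str(value or "").strip()
--
-- def _normalize_routing(values: object) -> list[str]:
--     if not isinstance(values, list):
--         return []
--     # Build the answer back-to-front: walk the list in reverse, and when a
--     # routable text is found, put it at the front and drop any later copy of it.
--     result: list[str] = []
--     for value in reversed(values):
--         text = _clean_text(value)
--         if text in ROUTABLE_CONCERNS:
--             result = [text] + [x for x in result if x != text]
--     return result
-- ===== Notes on version B (the rewrite author's own statement) =====
-- stated objective: alternative
-- what changed: Instead of a forward scan with an explicit seen-set, B builds the result back-to-front: it walks the list in reverse and, on each routable text, prepends it while filtering any later copy of it out of the accumulator, so no auxiliary seen structure exists.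
import Mathlib
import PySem

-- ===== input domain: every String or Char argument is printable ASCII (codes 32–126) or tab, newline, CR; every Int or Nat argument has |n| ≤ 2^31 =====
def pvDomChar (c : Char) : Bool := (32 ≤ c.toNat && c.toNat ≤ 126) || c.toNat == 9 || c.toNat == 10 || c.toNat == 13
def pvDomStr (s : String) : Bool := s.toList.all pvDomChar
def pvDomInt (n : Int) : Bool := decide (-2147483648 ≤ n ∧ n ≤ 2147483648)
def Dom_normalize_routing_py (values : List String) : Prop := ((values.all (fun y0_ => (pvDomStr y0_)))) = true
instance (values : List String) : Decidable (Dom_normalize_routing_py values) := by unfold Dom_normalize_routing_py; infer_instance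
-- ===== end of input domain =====

-- B builds the result back-to-front (reverse walk, prepend and drop later copies) instead of A's forward loop with a seen-set; equal return values, no side effects.


-- ROUTABLE_CONCERNS
def pvRC : List String := ["caption", "gps", "shown_location", "date"]

-- _clean_text(value) for a string argument: str(value or "") is the string itself (or "" which strips to ""), then .strip()
def pvCleanText (value : String) : String := PySem.Str.strip value

-- ===== PORT A =====
-- fused forward loop: state (seen, result); skip when text not routable or already seen
def normalize_routing_py (values : List String) : List String :=
  (values.foldl
    (fun (st : PySem.Set String × List String) value =>
      let text := pvCleanText value
      if ¬ pvRC.contains text ∨ PySem.Set.contains st.1 text then st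
      else (PySem.Set.add st.1 text, st.2 ++ [text]))
    (PySem.Set.empty, [])).2

-- ===== PORT B =====
-- for value in reversed(values): if routable, result = [text] + [x for x in result if x != text]
def normalize_routing_py_alt (values : List String) : List String :=
  values.reverse.foldl
    (fun (result : List String) value =>
      let text := pvCleanText value
      if pvRC.contains text then text :: result.filter (fun x => x ≠ text) else result)
    []

-- ===== PRECONDITION & SPEC =====
def Spec_normalize_routing_py (values : List String) (out : List String) : Prop := out = normalize_routing_py_alt values
instance (values : List String) (out : List String) : Decidable (Spec_normalize_routing_py values out) := by unfold Spec_normalize_routing_py; infer_instance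

-- ===== CLAIM (what is proved, stated in full; the proofs are below) =====
def Claim_equal_normalize_routing_py : Prop := ∀ (values : List String), Dom_normalize_routing_py values → Spec_normalize_routing_py values (normalize_routing_py values)

-- ===== LEMMAS AND PROOFS =====

-- A's fused loop with seen = result (as a list) equals folding Set.add over the filtered list
theorem pvLoop_eq (values : List String) : ∀ (r : List String),
    (values.foldl
      (fun (st : PySem.Set String × List String) value =>
        let text := pvCleanText value
        if ¬ pvRC.contains text ∨ PySem.Set.contains st.1 text then st
        else (PySem.Set.add st.1 text, st.2 ++ [text]))
      (r, r)).2
    = (values.filterMap (fun v =>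
        let t := pvCleanText v
        if pvRC.contains t then some t else none)).foldl PySem.Set.add r := by
  induction values with
  | nil => intro r; simp
  | cons v vs ih =>
    intro r
    simp only [List.foldl_cons, List.filterMap_cons, PySem.Set.contains, PySem.Set.add,
      List.contains_iff_mem] at ih ⊢
    by_cases hrc : pvCleanText v ∈ pvRC
    · by_cases hseen : pvCleanText v ∈ r
      · rw [if_pos (Or.inr hseen), if_pos hrc]
        simp only [List.foldl_cons]
        have hadd : PySem.Set.add r (pvCleanText v) = r := by
          simp [PySem.Set.add, hseen]
        rw [hadd]
        exact ih r
      · rw [if_neg (by simp [hrc, hseen]), if_pos hrc]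
        simp only [List.foldl_cons]
        have hadd : PySem.Set.add r (pvCleanText v) = r ++ [pvCleanText v] := by
          simp [PySem.Set.add, hseen]
        rw [hadd, if_neg hseen]
        exact ih (r ++ [pvCleanText v])
    · rw [if_pos (Or.inl hrc), if_neg hrc]
      exact ih r

-- classic first-occurrence dedup by structural recursion (proof helper only)
def pvDedup : List String → List String
  | [] => []
  | a :: l => a :: (pvDedup l).filter (fun x => x ≠ a)

-- folding Set.add from any start s appends the deduped tail elements not already in s
theorem pvFoldlAdd_eq (l : List String) : ∀ (s : List String),
    l.foldl PySem.Set.add s = s ++ (pvDedup l).filter (fun x => ¬ s.contains x) := by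
  induction l with
  | nil => intro s; simp [pvDedup]
  | cons a l ih =>
    intro s
    simp only [List.foldl_cons, pvDedup]
    by_cases hmem : a ∈ s
    · have hadd : PySem.Set.add s a = s := by
        simp [PySem.Set.add, PySem.Set.contains, hmem]
      rw [hadd, ih s]
      congr 1
      have hdrop : List.filter (fun x => decide ¬ s.contains x)
            (a :: List.filter (fun x => decide (x ≠ a)) (pvDedup l))
          = List.filter (fun x => decide ¬ s.contains x)
            (List.filter (fun x => decide (x ≠ a)) (pvDedup l)) := by
        simp [hmem]
      rw [hdrop, List.filter_filter]
      apply List.filter_congr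
      intro x _
      by_cases hxs : x ∈ s
      · simp [hxs]
      · have hxa : x ≠ a := fun h => hxs (h ▸ hmem)
        simp [hxs, hxa]
    · have hadd : PySem.Set.add s a = s ++ [a] := by
        simp [PySem.Set.add, PySem.Set.contains, hmem]
      rw [hadd, ih (s ++ [a])]
      simp only [List.filter_cons, List.append_assoc, List.cons_append, List.nil_append]
      rw [List.filter_filter]
      have hcond : (fun x => decide ¬ (s ++ [a]).contains x)
          = fun x => (decide (x ≠ a) && decide (¬ s.contains x)) := by
        funext x
        by_cases hxa : x = a
        · subst hxa; simp
        · simp [hxa]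
      rw [hcond]
      congr 1
      rw [if_pos (show (decide ¬ s.contains a = true) = true by simp [hmem])]
      congr 1
      apply List.filter_congr
      intro x _
      simp only [decide_not]
      exact Bool.and_comm _ _

-- B's per-element step over values computes pvDedup of the filtered list
theorem pvFoldr_eq (values : List String) :
    values.foldr
      (fun value (result : List String) =>
        let text := pvCleanText value
        if pvRC.contains text then text :: result.filter (fun x => x ≠ text) else result)
      []
    = pvDedup (values.filterMap (fun v =>
        let t := pvCleanText v
        if pvRC.contains t then some t else none)) := by
  induction values with
  | nil => rfl
  | cons v vs ih =>
    simp only [List.foldr_cons, List.filterMap_cons]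
    by_cases hrc : pvRC.contains (pvCleanText v)
    · simp only [hrc, if_pos, ih, pvDedup]
    · simp only [hrc, ih]
      simp

-- ===== VERDICT (by name: the statement is the Claim_ definition above) =====
theorem normalize_routing_py_spec : Claim_equal_normalize_routing_py := by
  intro values _
  show normalize_routing_py values = normalize_routing_py_alt values
  unfold normalize_routing_py normalize_routing_py_alt
  rw [List.foldl_reverse]
  have hB := pvFoldr_eq values
  have hA := pvLoop_eq values []
  simp only [PySem.Set.empty] at *
  rw [hA, pvFoldlAdd_eq, hB]
  simp
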